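-- pv_equiv track=rewrite | github.com/PHNPR/Leetcode-Solutions | 3365.py | isPossibleToRearrange
-- ===== SOURCE A (Python) =====
-- def isPossibleToRearrange(s: str, t: str, k: int) -> bool:
--     n, dic = len(s), {}
--     x = n//k
--     for i in range(0, n, x) :
--         dic[s[i:i+x]] = dic.get(s[i:i+x], 0) + 1
--     for i in range(0, n, x) :
--         if t[i:i+x] not in dic :
--             return False
--         dic[t[i:i+x]] -= 1
--         if dic[t[i:i+x]] == 0 :
--             del dic[t[i:i+x]]
--     return True
-- ===== SOURCE B (Python) =====
-- def isPossibleToRearrange(s: str, t: str, k: int) -> bool: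
--     x = len(s) // k
--     s_blocks = [s[i:i+x] for i in range(0, len(s), x)]
--     t_blocks = [t[i:i+x] for i in range(0, len(s), x)]
--     return sorted(s_blocks) == sorted(t_blocks)
-- ===== Notes on version B (the rewrite author's own statement) =====
-- stated objective: simpler
-- what changed: Replaces A's hash-table count-then-decrement loop with an early return by building the two block lists once, sorting both, and comparing the sorted lists for multiset equality.
import Mathlib
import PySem

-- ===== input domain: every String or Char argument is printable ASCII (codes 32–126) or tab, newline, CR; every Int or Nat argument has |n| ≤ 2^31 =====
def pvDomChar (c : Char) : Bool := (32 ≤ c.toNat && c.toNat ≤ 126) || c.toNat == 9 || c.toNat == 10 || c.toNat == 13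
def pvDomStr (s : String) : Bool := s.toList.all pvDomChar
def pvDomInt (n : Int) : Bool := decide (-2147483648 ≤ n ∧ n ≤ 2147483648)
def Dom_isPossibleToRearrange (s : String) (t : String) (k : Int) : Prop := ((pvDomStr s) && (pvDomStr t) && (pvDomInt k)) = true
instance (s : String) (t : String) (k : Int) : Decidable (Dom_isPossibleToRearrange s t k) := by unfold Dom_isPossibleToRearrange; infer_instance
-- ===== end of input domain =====

-- B replaces A's hash-table count/decrement loop by sorting the two block lists and
-- comparing them (objective: simpler). Return values agree on every input where A returns.

-- ===== PORT A =====
-- the second Python loop, with its early 'return False'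
def pyLoop2 (t : String) (x : Int) : List Int → PySem.Dict String Int → Bool
  | [], _ => true
  | i :: rest, dic =>
    if ¬ (dic.contains (PySem.Str.slice t (some i) (some (i + x))) = true) then false
    else
      let b := PySem.Str.slice t (some i) (some (i + x))
      let dic := dic.insert b (dic.getD b 0 - 1)
      if dic.getD b 0 == 0 then pyLoop2 t x rest (dic.erase b)
      else pyLoop2 t x rest dic

def isPossibleToRearrange (s : String) (t : String) (k : Int) : Bool :=
  let n : Int := PySem.Str.len s
  let dic : PySem.Dict String Int := PySem.Dict.empty
  let x : Int := PySem.Int.floordiv n k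
  let dic := (PySem.List.pyRange 0 n x).foldl
    (fun d i => d.insert (PySem.Str.slice s (some i) (some (i + x)))
                  (d.getD (PySem.Str.slice s (some i) (some (i + x))) 0 + 1)) dic
  pyLoop2 t x (PySem.List.pyRange 0 n x) dic

-- ===== PORT B =====
def isPossibleToRearrange_alt (s : String) (t : String) (k : Int) : Bool :=
  let x : Int := PySem.Int.floordiv (PySem.Str.len s) k
  let sBlocks := (PySem.List.pyRange 0 (PySem.Str.len s) x).map
    (fun i => PySem.Str.slice s (some i) (some (i + x)))
  let tBlocks := (PySem.List.pyRange 0 (PySem.Str.len s) x).map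
    (fun i => PySem.Str.slice t (some i) (some (i + x)))
  PySem.List.sorted sBlocks (fun b => b) false == PySem.List.sorted tBlocks (fun b => b) false

-- ===== PRECONDITION & SPEC =====
-- Pre_ excludes exactly the inputs where Python A raises: k = 0 (ZeroDivisionError on n//k)
-- and len(s)//k = 0 (ValueError: range() step must not be zero).
def Pre_isPossibleToRearrange (s : String) (t : String) (k : Int) : Prop :=
  k ≠ 0 ∧ PySem.Int.floordiv (PySem.Str.len s) k ≠ 0

instance (s : String) (t : String) (k : Int) : Decidable (Pre_isPossibleToRearrange s t k) := by
  unfold Pre_isPossibleToRearrange; infer_instance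

def pvWitness_isPossibleToRearrange : String × String × Int := ("abab", "baba", 2)

def Spec_isPossibleToRearrange (s : String) (t : String) (k : Int) (out : Bool) : Prop := out = isPossibleToRearrange_alt s t k
instance (s : String) (t : String) (k : Int) (out : Bool) : Decidable (Spec_isPossibleToRearrange s t k out) := by unfold Spec_isPossibleToRearrange; infer_instance

-- ===== CLAIM (what is proved, stated in full; the proofs are below) =====
def Claim_equal_isPossibleToRearrange : Prop := ∀ (s : String) (t : String) (k : Int), Dom_isPossibleToRearrange s t k → Pre_isPossibleToRearrange s t k → Spec_isPossibleToRearrange s t k (isPossibleToRearrange s t k)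

-- ===== LEMMAS AND PROOFS =====

-- the dictionary invariant maintained by A's second loop:
-- stored counts are nonnegative and a key is present exactly when its count is nonzero
def InvD (d : PySem.Dict String Int) : Prop :=
  ∀ b : String, 0 ≤ d.getD b 0 ∧ (d.contains b = true ↔ d.getD b 0 ≠ 0)

theorem erase_get?_eq (d : PySem.Dict String Int) (b b' : String) :
    (d.erase b).get? b' = if b' = b then none else d.get? b' := by
  simp only [PySem.Dict.erase, PySem.Dict.get?]
  induction d.items with
  | nil => simp
  | cons p rest ih =>
    by_cases hpb : p.1 = b <;> by_cases hpb' : p.1 = b' <;> by_cases hbb : b' = b <;>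
      simp_all [List.filter_cons, List.find?_cons, beq_iff_eq]

theorem erase_getD_eq (d : PySem.Dict String Int) (b b' : String) :
    (d.erase b).getD b' 0 = if b' = b then 0 else d.getD b' 0 := by
  simp only [PySem.Dict.getD, erase_get?_eq]
  split_ifs <;> rfl

theorem erase_contains_eq (d : PySem.Dict String Int) (b b' : String) :
    (d.erase b).contains b' = (decide (b' ≠ b) && d.contains b') := by
  simp only [PySem.Dict.erase, PySem.Dict.contains]
  induction d.items with
  | nil => simp
  | cons p rest ih =>
    by_cases hpb : p.1 = b <;> by_cases hpb' : p.1 = b' <;> by_cases hbb : b' = b <;>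
      simp_all [List.filter_cons, beq_iff_eq]

-- A's consuming loop succeeds iff the blocks of t (over index list I) fit under the counts in d
theorem pyLoop2_iff (t : String) (x : Int) (I : List Int) (d : PySem.Dict String Int)
    (hinv : InvD d) :
    pyLoop2 t x I d = true ↔
      ∀ b : String,
        ((I.map (fun i => PySem.Str.slice t (some i) (some (i + x)))).count b : Int) ≤ d.getD b 0 := by
  induction I generalizing d with
  | nil =>
    simp only [pyLoop2, List.map_nil, List.count_nil, true_iff, Nat.cast_zero]
    exact fun b => (hinv b).1
  | cons i rest ih =>
    set b0 := PySem.Str.slice t (some i) (some (i + x)) with hb0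
    by_cases hc : d.contains b0 = true
    · have hpos : 1 ≤ d.getD b0 0 := by
        have h0 := (hinv b0).1
        have hne := (hinv b0).2.1 hc
        omega
      set v := d.getD b0 0 with hv
      set d1 := d.insert b0 (v - 1) with hd1
      have hd1getD : ∀ b' : String, d1.getD b' 0 = if b' = b0 then v - 1 else d.getD b' 0 := by
        intro b'; simp [hd1, PySem.Dict.getD_insert]
      -- the dictionary after the decrement and the conditional delete, in both cases
      set d2 := if v - 1 = 0 then d1.erase b0 else d1 with hd2
      have hstep : pyLoop2 t x (i :: rest) d = pyLoop2 t x rest d2 := by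
        by_cases hz : v - 1 = 0
        · simp [pyLoop2, hc, ← hb0, ← hv, hz, hd2]
          rw [hd1, hz]
        · simp [pyLoop2, hc, ← hb0, ← hv, hd1getD b0, hz, hd2]
          rw [hd1]
      have hd2getD : ∀ b' : String, d2.getD b' 0 = if b' = b0 then v - 1 else d.getD b' 0 := by
        intro b'
        by_cases hz : v - 1 = 0
        · rw [hd2, if_pos hz, erase_getD_eq]
          by_cases hbb : b' = b0 <;> simp [hbb, hd1getD, hz]
        · rw [hd2, if_neg hz, hd1getD]
      have hd2contains : ∀ b' : String, b' ≠ b0 → d2.contains b' = d.contains b' := by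
        intro b' hbb
        by_cases hz : v - 1 = 0
        · rw [hd2, if_pos hz, erase_contains_eq, hd1, PySem.Dict.contains_insert]
          simp [hbb]
        · rw [hd2, if_neg hz, hd1, PySem.Dict.contains_insert]
          simp [hbb]
      have hinv2 : InvD d2 := by
        intro b'
        by_cases hbb : b' = b0
        · rw [hbb, hd2getD b0, if_pos rfl]
          by_cases hz : v - 1 = 0
          · refine ⟨by omega, ?_⟩
            rw [hd2, if_pos hz, erase_contains_eq]
            simp [hz]
          · refine ⟨by omega, ?_⟩
            rw [hd2, if_neg hz, hd1, PySem.Dict.contains_insert]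
            simp [hz]
        · rw [hd2getD b', if_neg hbb, hd2contains b' hbb]
          exact hinv b'
      rw [hstep, ih _ hinv2]
      constructor
      · intro h b'
        have hb := h b'
        rw [hd2getD b'] at hb
        simp only [List.map_cons, List.count_cons, beq_iff_eq, ← hb0]
        push_cast
        by_cases hbb : b0 = b'
        · subst hbb
          rw [if_pos rfl] at hb
          rw [if_pos rfl]
          omega
        · rw [if_neg (fun hh => hbb hh.symm)] at hb
          rw [if_neg hbb]
          omega
      · intro h b'
        have hb := h b'
        simp only [List.map_cons, List.count_cons, beq_iff_eq, ← hb0] at hb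
        push_cast at hb
        rw [hd2getD b']
        by_cases hbb : b0 = b'
        · subst hbb
          rw [if_pos rfl] at hb
          rw [if_pos rfl]
          omega
        · rw [if_neg hbb] at hb
          rw [if_neg (fun hh => hbb hh.symm)]
          omega
    · -- missing key: A returns False, and the count bound fails at b0
      have hz : d.getD b0 0 = 0 := by
        by_contra hne
        exact hc ((hinv b0).2.2 hne)
      constructor
      · intro h
        exact absurd h (by simp [pyLoop2, hc, ← hb0])
      · intro h
        exfalso
        have hb := h b0
        simp only [List.map_cons, List.count_cons, beq_iff_eq, ← hb0, if_pos rfl, hz] at hb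
        push_cast at hb
        have hc0 : (0 : Int) ≤ (List.map (fun i => PySem.Str.slice t (some i) (some (i + x))) rest).count b0 := by positivity
        omega

-- the counting loop of A produces exactly the counts of the s-blocks, with the invariant
theorem counter_getD (S : List String) (b : String) :
    (S.foldl (fun d x => d.insert x (d.getD x 0 + 1)) (PySem.Dict.empty : PySem.Dict String Int)).getD b 0
      = (S.count b : Int) := by
  rw [PySem.Dict.foldl_insert_getD_add_one_eq_counter, PySem.Dict.getD_counter]

theorem counter_inv (S : List String) :
    InvD (S.foldl (fun d x => d.insert x (d.getD x 0 + 1)) (PySem.Dict.empty : PySem.Dict String Int)) := by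
  intro b
  rw [counter_getD]
  refine ⟨by positivity, ?_⟩
  rw [PySem.Dict.foldl_insert_getD_add_one_eq_counter, PySem.Dict.contains_counter]
  simp [List.contains_iff_mem, ← List.count_pos_iff]
  omega

-- pointwise count ≤ plus equal length forces a permutation
theorem perm_of_count_le_of_length_eq (S T : List String)
    (hlen : T.length = S.length) (h : ∀ b, T.count b ≤ S.count b) : T.Perm S := by
  have hsub : T.Subperm S := List.subperm_ext_iff.mpr (fun a _ => h a)
  exact hsub.perm_of_length_le (le_of_eq hlen.symm)

-- ===== VERDICT (by name: the statement is the Claim_ definition above) =====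
theorem isPossibleToRearrange_spec : Claim_equal_isPossibleToRearrange := by
  intro s t k _ _
  unfold Spec_isPossibleToRearrange
  simp only [isPossibleToRearrange, isPossibleToRearrange_alt]
  set n : Int := PySem.Str.len s with hn
  set x : Int := PySem.Int.floordiv n k with hx
  set I := PySem.List.pyRange 0 n x with hI
  set S := I.map (fun i => PySem.Str.slice s (some i) (some (i + x))) with hS
  set T := I.map (fun i => PySem.Str.slice t (some i) (some (i + x))) with hT
  have hfold : I.foldl
      (fun d i => d.insert (PySem.Str.slice s (some i) (some (i + x)))
        (d.getD (PySem.Str.slice s (some i) (some (i + x))) 0 + 1))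
      (PySem.Dict.empty : PySem.Dict String Int)
      = S.foldl (fun d b => d.insert b (d.getD b 0 + 1)) PySem.Dict.empty := by
    rw [hS, List.foldl_map]
  rw [Bool.eq_iff_iff, hfold, pyLoop2_iff t x I _ (counter_inv S), beq_iff_eq,
      PySem.List.sorted_id_eq_sorted_id_iff_perm]
  have hiff : ∀ b : String, (((T.count b : Int) ≤
      (S.foldl (fun d b => d.insert b (d.getD b 0 + 1)) (PySem.Dict.empty : PySem.Dict String Int)).getD b 0)
      ↔ (T.count b ≤ S.count b)) := by
    intro b
    rw [counter_getD]
    exact_mod_cast Iff.rfl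
  rw [← hT, forall_congr' hiff]
  constructor
  · intro h
    exact (perm_of_count_le_of_length_eq S T (by simp [hS, hT]) h).symm
  · intro h b
    exact le_of_eq ((List.perm_iff_count.mp h.symm) b)
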